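-- pv_equiv track=rewrite | github.com/mental-disaster/problems-solve | 프로그래머스/2/389479. 서버 증설 횟수/서버 증설 횟수.py | solution
-- ===== SOURCE A (Python) =====
-- def solution(players, m, k):
--     servers = [p//m for p in players]
--
--     if k > 1:
--         for i in range(1, len(servers)):
--             w_size = min(k-1, i)
--             windows = servers[i-w_size:i]
--             servers[i] = max(0, servers[i]-sum(windows))
--
--     return sum(servers)
-- ===== SOURCE B (Python) =====
-- def solution(players, m, k):
--     # One pass with an incrementally maintained sum of the last k-1 updated values
--     # (A re-slices and re-sums the window at every index: O(n*k) -> O(n)).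
--     if k <= 1:
--         return sum(p // m for p in players)
--     total = 0
--     vals = []
--     wsum = 0
--     for idx, p in enumerate(players):
--         v = p // m
--         if idx > 0:
--             v = max(0, v - wsum)
--         vals.append(v)
--         wsum += v
--         if idx >= k - 1:
--             wsum -= vals[idx - (k - 1)]
--         total += v
--     return total
-- ===== Notes on version B (the rewrite author's own statement) =====
-- stated objective: faster
-- what changed: B makes one pass keeping a running sum of the last k-1 updated values (updated incrementally as the window slides), instead of A's re-slicing and re-summing a window of up to k-1 elements at every index.
import Mathlib
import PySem

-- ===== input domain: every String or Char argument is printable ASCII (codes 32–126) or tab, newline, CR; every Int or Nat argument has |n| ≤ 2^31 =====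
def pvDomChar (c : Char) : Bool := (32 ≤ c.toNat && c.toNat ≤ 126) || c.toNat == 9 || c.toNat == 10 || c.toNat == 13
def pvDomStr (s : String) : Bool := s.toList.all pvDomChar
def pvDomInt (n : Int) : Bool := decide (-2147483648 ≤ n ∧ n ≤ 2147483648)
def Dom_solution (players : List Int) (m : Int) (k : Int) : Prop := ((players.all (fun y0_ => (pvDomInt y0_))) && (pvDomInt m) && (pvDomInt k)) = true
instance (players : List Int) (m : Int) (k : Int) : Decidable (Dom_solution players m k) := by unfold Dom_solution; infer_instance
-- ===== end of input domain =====

-- B replaces A's per-index window slice+sum by an incrementally maintained running window sum (one pass, O(n) vs O(n*k)).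

-- ===== PORT A =====
def solution (players : List Int) (m : Int) (k : Int) : Int :=
  let servers := players.map (fun p => PySem.Int.floordiv p m)
  let servers :=
    if k > 1 then
      (PySem.List.pyRange 1 (servers.length : Int) 1).foldl (fun s i =>
        let w_size := min (k - 1) i
        let windows := PySem.List.slice s (some (i - w_size)) (some i)
        PySem.List.pySetD s i (max 0 (PySem.List.pyGetD s i 0 - windows.sum))) servers
    else servers
  servers.sum

-- ===== PORT B =====
def solution_alt (players : List Int) (m : Int) (k : Int) : Int :=
  if k ≤ 1 then
    (players.map (fun p => PySem.Int.floordiv p m)).sum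
  else
    let st := (PySem.List.enumerate players).foldl
      (fun (st : Int × List Int × Int) ip =>
        let total := st.1
        let vals := st.2.1
        let wsum := st.2.2
        let v0 := PySem.Int.floordiv ip.2 m
        let v := if ip.1 > 0 then max 0 (v0 - wsum) else v0
        let vals' := vals ++ [v]
        let wsum' := wsum + v
        let wsum'' := if ip.1 ≥ k - 1 then wsum' - PySem.List.pyGetD vals' (ip.1 - (k - 1)) 0 else wsum'
        (total + v, vals', wsum'')) (0, [], 0)
    st.1

-- ===== PRECONDITION & SPEC =====
-- Pre_ excludes exactly the inputs where Python A raises ZeroDivisionError (m = 0 with a nonempty list).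
def Pre_solution (players : List Int) (m : Int) (k : Int) : Prop := players = [] ∨ m ≠ 0
instance (players : List Int) (m : Int) (k : Int) : Decidable (Pre_solution players m k) := by unfold Pre_solution; infer_instance
def pvWitness_solution : List Int × Int × Int := ([300, 1000, 500], 300, 5)

def Spec_solution (players : List Int) (m : Int) (k : Int) (out : Int) : Prop := out = solution_alt players m k
instance (players : List Int) (m : Int) (k : Int) (out : Int) : Decidable (Spec_solution players m k out) := by unfold Spec_solution; infer_instance

-- ===== CLAIM (what is proved, stated in full; the proofs are below) =====
def Claim_equal_solution : Prop := ∀ (players : List Int) (m : Int) (k : Int), Dom_solution players m k → Pre_solution players m k → Spec_solution players m k (solution players m k)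

-- ===== LEMMAS AND PROOFS =====

def spineStep (W : Nat) (acc : List Int) (x : Int) : List Int :=
  acc ++ [if acc.length = 0 then x else max 0 (x - ((acc.drop (acc.length - W)).sum))]

lemma A_step (k : Int) (hk : 1 < k) (acc rest : List Int) (x : Int) (hacc : acc ≠ []) :
    PySem.List.pySetD (acc ++ x :: rest) (acc.length : Int)
      (max 0 (PySem.List.pyGetD (acc ++ x :: rest) (acc.length : Int) 0 -
        (PySem.List.slice (acc ++ x :: rest)
          (some ((acc.length : Int) - min (k - 1) (acc.length : Int))) (some (acc.length : Int))).sum))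
    = (spineStep (k - 1).toNat acc x) ++ rest := by
  have hL : 0 < acc.length := List.length_pos_iff.mpr hacc
  have hW : ((k - 1).toNat : Int) = k - 1 := Int.toNat_of_nonneg (by omega)
  have hget : PySem.List.pyGetD (acc ++ x :: rest) (acc.length : Int) 0 = x := by
    simp [List.getD_eq_getElem?_getD]
  have h0 : (0:Int) ≤ (acc.length : Int) - min (k - 1) (acc.length : Int) := by omega
  have hwin : PySem.List.slice (acc ++ x :: rest)
      (some ((acc.length : Int) - min (k - 1) (acc.length : Int))) (some (acc.length : Int))
      = acc.drop (acc.length - (k - 1).toNat) := by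
    rw [PySem.List.slice_toNat (acc ++ x :: rest) h0 (Int.natCast_nonneg _)]
    have e1 : ((acc.length : Int) - min (k - 1) (acc.length : Int)).toNat
        = acc.length - (k - 1).toNat := by omega
    have e2 : (acc.length : Int).toNat = acc.length := by omega
    rw [e1, e2]
    have hle : acc.length - (k - 1).toNat ≤ acc.length := by omega
    rw [List.drop_append_of_le_length hle]
    apply List.take_left'
    simp
  rw [hget, hwin]
  simp only [PySem.List.pySetD_natCast]
  simp [spineStep, Nat.pos_iff_ne_zero.mp hL]

lemma A_loop (k : Int) (hk : 1 < k) (rest : List Int) :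
    ∀ (acc : List Int), acc ≠ [] →
    (PySem.List.pyRange (acc.length : Int) ((acc.length : Int) + (rest.length : Int)) 1).foldl
      (fun s i => PySem.List.pySetD s i
        (max 0 (PySem.List.pyGetD s i 0 -
          (PySem.List.slice s (some (i - min (k - 1) i)) (some i)).sum)))
      (acc ++ rest)
    = rest.foldl (spineStep (k - 1).toNat) acc := by
  induction rest with
  | nil =>
    intro acc _
    simp [PySem.List.pyRange_one_eq_nil]
  | cons x rest ih =>
    intro acc hacc
    have hlt : (acc.length : Int) < (acc.length : Int) + ((x :: rest).length : Int) := by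
      simp only [List.length_cons]; push_cast; omega
    rw [PySem.List.pyRange_one_cons hlt]
    simp only [List.foldl_cons]
    rw [A_step k hk acc rest x hacc]
    have h2 := ih (spineStep (k - 1).toNat acc x) (by simp [spineStep])
    have hlen : ((spineStep (k - 1).toNat acc x).length : Int) = (acc.length : Int) + 1 := by
      simp [spineStep]
    rw [hlen] at h2
    have hrange : (acc.length : Int) + 1 + (rest.length : Int)
        = (acc.length : Int) + ((x :: rest).length : Int) := by
      simp only [List.length_cons]; push_cast; ring
    rw [hrange] at h2
    rw [h2]

lemma B_step (m k : Int) (hk : 1 < k) (acc : List Int) (p : Int) :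
    ((acc.sum +
        if (acc.length : Int) > 0 then
          max 0 (PySem.Int.floordiv p m - (acc.drop (acc.length - (k - 1).toNat)).sum)
        else PySem.Int.floordiv p m,
      acc ++
        [if (acc.length : Int) > 0 then
            max 0 (PySem.Int.floordiv p m - (acc.drop (acc.length - (k - 1).toNat)).sum)
          else PySem.Int.floordiv p m],
      if (acc.length : Int) ≥ k - 1 then
        ((acc.drop (acc.length - (k - 1).toNat)).sum +
            if (acc.length : Int) > 0 then
              max 0 (PySem.Int.floordiv p m - (acc.drop (acc.length - (k - 1).toNat)).sum)
            else PySem.Int.floordiv p m) -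
          PySem.List.pyGetD
            (acc ++
              [if (acc.length : Int) > 0 then
                  max 0 (PySem.Int.floordiv p m - (acc.drop (acc.length - (k - 1).toNat)).sum)
                else PySem.Int.floordiv p m])
            ((acc.length : Int) - (k - 1)) 0
      else
        (acc.drop (acc.length - (k - 1).toNat)).sum +
          if (acc.length : Int) > 0 then
            max 0 (PySem.Int.floordiv p m - (acc.drop (acc.length - (k - 1).toNat)).sum)
          else PySem.Int.floordiv p m) : Int × List Int × Int)
    = ((spineStep (k - 1).toNat acc (PySem.Int.floordiv p m)).sum,
       spineStep (k - 1).toNat acc (PySem.Int.floordiv p m),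
       ((spineStep (k - 1).toNat acc (PySem.Int.floordiv p m)).drop
         ((spineStep (k - 1).toNat acc (PySem.Int.floordiv p m)).length - (k - 1).toNat)).sum) := by
  have hW : ((k - 1).toNat : Int) = k - 1 := Int.toNat_of_nonneg (by omega)
  have hW1 : 1 ≤ (k - 1).toNat := by omega
  have hv : (if (acc.length : Int) > 0 then
        max 0 (PySem.Int.floordiv p m - (acc.drop (acc.length - (k - 1).toNat)).sum)
      else PySem.Int.floordiv p m)
      = (if acc.length = 0 then PySem.Int.floordiv p m
         else max 0 (PySem.Int.floordiv p m - (acc.drop (acc.length - (k - 1).toNat)).sum)) := by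
    rcases Nat.eq_zero_or_pos acc.length with h | h
    · simp [h]
    · rw [if_pos (by exact_mod_cast h), if_neg (by omega)]
  rw [hv]
  have hspine : spineStep (k - 1).toNat acc (PySem.Int.floordiv p m)
      = acc ++ [if acc.length = 0 then PySem.Int.floordiv p m
         else max 0 (PySem.Int.floordiv p m - (acc.drop (acc.length - (k - 1).toNat)).sum)] := by
    rw [spineStep]
  rw [hspine]
  set v := (if acc.length = 0 then PySem.Int.floordiv p m
         else max 0 (PySem.Int.floordiv p m - (acc.drop (acc.length - (k - 1).toNat)).sum)) with hvdef
  set W := (k - 1).toNat with hWdef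
  set L := acc.length with hLdef
  refine Prod.ext ?_ (Prod.ext ?_ ?_)
  · simp
  · simp
  · simp only []
    have hlen : (acc ++ [v]).length = L + 1 := by simp [hLdef]
    rw [hlen]
    by_cases hWL : W ≤ L
    · rw [if_pos (by omega : (L : Int) ≥ k - 1)]
      have he : (L : Int) - (k - 1) = ((L - W : Nat) : Int) := by omega
      rw [he]
      have hlt : L - W < L := by omega
      have hget : PySem.List.pyGetD (acc ++ [v]) ((L - W : Nat) : Int) 0 = acc[L - W] := by
        simp [List.getD_eq_getElem?_getD, List.getElem?_append_left (by omega : L - W < acc.length),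
          List.getElem?_eq_getElem (by omega : L - W < acc.length)]
      rw [hget]
      have hdrop1 : (acc ++ [v]).drop (L + 1 - W) = acc.drop (L + 1 - W) ++ [v] :=
        List.drop_append_of_le_length (by omega)
      have hdrop2 : acc.drop (L - W) = acc[L - W] :: acc.drop (L - W + 1) :=
        List.drop_eq_getElem_cons hlt
      have he2 : L - W + 1 = L + 1 - W := by omega
      rw [hdrop1, hdrop2, he2]
      simp
      ring
    · rw [if_neg (by omega : ¬ ((L : Int) ≥ k - 1))]
      have h1 : L - W = 0 := by omega
      have h2 : L + 1 - W = 0 := by omega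
      rw [h1, h2]
      simp

lemma B_loop (m k : Int) (hk : 1 < k) (ps : List Int) :
    ∀ (acc : List Int),
    (PySem.List.enumerate ps (acc.length : Int)).foldl
      (fun (st : Int × List Int × Int) ip =>
        let total := st.1
        let vals := st.2.1
        let wsum := st.2.2
        let v0 := PySem.Int.floordiv ip.2 m
        let v := if ip.1 > 0 then max 0 (v0 - wsum) else v0
        let vals' := vals ++ [v]
        let wsum' := wsum + v
        let wsum'' := if ip.1 ≥ k - 1 then wsum' - PySem.List.pyGetD vals' (ip.1 - (k - 1)) 0 else wsum'
        (total + v, vals', wsum''))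
      (acc.sum, acc, (acc.drop (acc.length - (k - 1).toNat)).sum)
    = (((ps.map (fun p => PySem.Int.floordiv p m)).foldl (spineStep (k - 1).toNat) acc).sum,
       (ps.map (fun p => PySem.Int.floordiv p m)).foldl (spineStep (k - 1).toNat) acc,
       (((ps.map (fun p => PySem.Int.floordiv p m)).foldl (spineStep (k - 1).toNat) acc).drop
         (((ps.map (fun p => PySem.Int.floordiv p m)).foldl (spineStep (k - 1).toNat) acc).length
           - (k - 1).toNat)).sum) := by
  induction ps with
  | nil => intro acc; simp [PySem.List.enumerate]
  | cons p ps ih =>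
    intro acc
    rw [PySem.List.enumerate_cons, List.foldl_cons]
    simp only []
    rw [B_step m k hk acc p]
    have ih' := ih (spineStep (k - 1).toNat acc (PySem.Int.floordiv p m))
    simp only [] at ih'
    have hlen : (acc.length : Int) + 1
        = ((spineStep (k - 1).toNat acc (PySem.Int.floordiv p m)).length : Int) := by
      simp [spineStep]
    rw [hlen, ih']
    simp

lemma A_side (players : List Int) (m k : Int) (hk : 1 < k) :
    solution players m k
    = ((players.map (fun p => PySem.Int.floordiv p m)).foldl (spineStep (k - 1).toNat) []).sum := by
  cases players with
  | nil => simp [solution]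
  | cons p ps =>
    simp only [solution]
    rw [if_pos (by omega : k > 1)]
    rw [List.map_cons]
    have hA := A_loop k hk (ps.map (fun p => PySem.Int.floordiv p m))
      [PySem.Int.floordiv p m] (by simp)
    simp only [List.length_singleton, Nat.cast_one, List.singleton_append] at hA
    have hlen : (((PySem.Int.floordiv p m :: ps.map (fun p => PySem.Int.floordiv p m)).length : Nat) : Int)
        = 1 + ((ps.map (fun p => PySem.Int.floordiv p m)).length : Int) := by
      simp only [List.length_cons]; push_cast; ring
    rw [hlen, hA, List.foldl_cons]
    have : spineStep (k - 1).toNat [] (PySem.Int.floordiv p m) = [PySem.Int.floordiv p m] := by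
      simp [spineStep]
    rw [this]

lemma B_side (players : List Int) (m k : Int) (hk : 1 < k) :
    solution_alt players m k
    = ((players.map (fun p => PySem.Int.floordiv p m)).foldl (spineStep (k - 1).toNat) []).sum := by
  simp only [solution_alt]
  rw [if_neg (by omega : ¬ k ≤ 1)]
  have hB := B_loop m k hk players []
  simp only [List.length_nil, Nat.cast_zero, List.sum_nil, List.drop_nil] at hB
  rw [hB]

-- ===== VERDICT (by name: the statement is the Claim_ definition above) =====
theorem solution_spec : Claim_equal_solution := by
  intro players m k _ _
  unfold Spec_solution
  by_cases hk : k ≤ 1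
  · simp [solution, solution_alt, hk, not_lt.mpr hk]
  · have hk' : 1 < k := by omega
    rw [A_side players m k hk', B_side players m k hk']
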